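-- pv_equiv track=rewrite | github.com/LoremNorand/Reliance | style_guide.py | sort_keywords
-- ===== SOURCE A (Python) =====
-- def sort_keywords(declaration: str) -> str:
--     """
--     Сортирует модификаторы доступа и другие ключевые слова в объявлении члена класса.
--
--     Args:
--         declaration (str): Исходная строка с ключевыми словами.
--
--     Returns:
--         str: Отсортированная строка.
--     """
--     if not isinstance(declaration, str):
--         return ''
--     parts = declaration.split()
--     access_modifiers = ["public", "protected", "private", "internal"]
--     other_modifiers = ["static", "async", "unsafe", "readonly", "volatile", "extern",
--                        "partial", "abstract", "virtual", "override", "sealed",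
--                        "new", "const", "required", "init"]
--     type_keywords = ["class", "struct", "interface", "enum", "delegate", "record"]
--     designators = ["primary"]
--
--     access = [p for p in parts if p in access_modifiers]
--     others = [p for p in parts if p in other_modifiers]
--     types = [p for p in parts if p in type_keywords]
--     desig = [p for p in parts if p in designators]
--     names = [p for p in parts if p not in access_modifiers + other_modifiers + type_keywords + designators]
--
--     ordered = access + others + types + desig + names
--     return ' '.join(ordered)
-- ===== SOURCE B (Python) =====
-- _ACCESS = ["public", "protected", "private", "internal"]
-- _OTHER = ["static", "async", "unsafe", "readonly", "volatile", "extern",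
--           "partial", "abstract", "virtual", "override", "sealed",
--           "new", "const", "required", "init"]
-- _TYPE = ["class", "struct", "interface", "enum", "delegate", "record"]
-- _DESIG = ["primary"]
--
--
-- def _rank(w):
--     if w in _ACCESS:
--         return 0
--     if w in _OTHER:
--         return 1
--     if w in _TYPE:
--         return 2
--     if w in _DESIG:
--         return 3
--     return 4
--
--
-- def sort_keywords(declaration: str) -> str:
--     if not isinstance(declaration, str):
--         return ''
--     return ' '.join(sorted(declaration.split(), key=_rank))
-- ===== Notes on version B (the rewrite author's own statement) =====
-- stated objective: simpler
-- what changed: Replaces the five separate membership-filter passes and their concatenation by a single stable sort of the words keyed by a category rank function (access=0, other=1, type=2, designator=3, anything else=4), relying on sort stability to keep the original order within each category.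
import Mathlib
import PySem

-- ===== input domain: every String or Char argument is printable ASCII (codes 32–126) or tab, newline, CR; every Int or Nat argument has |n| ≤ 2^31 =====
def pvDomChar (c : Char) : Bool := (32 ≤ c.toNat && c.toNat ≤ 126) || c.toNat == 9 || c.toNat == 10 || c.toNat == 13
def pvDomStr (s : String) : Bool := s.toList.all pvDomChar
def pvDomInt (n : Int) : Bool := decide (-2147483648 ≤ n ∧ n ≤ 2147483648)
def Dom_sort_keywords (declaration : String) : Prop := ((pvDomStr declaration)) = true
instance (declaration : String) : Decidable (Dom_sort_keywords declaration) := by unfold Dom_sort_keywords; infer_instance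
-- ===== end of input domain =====

-- B replaces A's five membership-filter passes and their concatenation by ONE stable sort of the
-- words keyed by a category rank function (objective: simpler; same cost class in practice).

-- ===== PORT A =====
-- A's isinstance guard cannot fire under the type convention (the argument is always a String).
def pvAccessModifiers : List String := ["public", "protected", "private", "internal"]
def pvOtherModifiers : List String := ["static", "async", "unsafe", "readonly", "volatile", "extern",
  "partial", "abstract", "virtual", "override", "sealed", "new", "const", "required", "init"]
def pvTypeKeywords : List String := ["class", "struct", "interface", "enum", "delegate", "record"]
def pvDesignators : List String := ["primary"]

def sort_keywords (declaration : String) : String :=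
  let parts := PySem.Str.split₀ declaration
  let access := parts.filter (fun p => pvAccessModifiers.contains p)
  let others := parts.filter (fun p => pvOtherModifiers.contains p)
  let types := parts.filter (fun p => pvTypeKeywords.contains p)
  let desig := parts.filter (fun p => pvDesignators.contains p)
  let names := parts.filter
    (fun p => !((pvAccessModifiers ++ pvOtherModifiers ++ pvTypeKeywords ++ pvDesignators).contains p))
  PySem.Str.join " " (access ++ others ++ types ++ desig ++ names)

-- ===== PORT B =====
def pvRank (w : String) : Int :=
  if pvAccessModifiers.contains w then 0
  else if pvOtherModifiers.contains w then 1
  else if pvTypeKeywords.contains w then 2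
  else if pvDesignators.contains w then 3
  else 4

def sort_keywords_alt (declaration : String) : String :=
  PySem.Str.join " " (PySem.List.sorted (PySem.Str.split₀ declaration) pvRank false)

-- ===== PRECONDITION & SPEC =====
def Spec_sort_keywords (declaration : String) (out : String) : Prop := out = sort_keywords_alt declaration
instance (declaration : String) (out : String) : Decidable (Spec_sort_keywords declaration out) := by unfold Spec_sort_keywords; infer_instance

-- ===== CLAIM (what is proved, stated in full; the proofs are below) =====
def Claim_equal_sort_keywords : Prop := ∀ (declaration : String), Dom_sort_keywords declaration → Spec_sort_keywords declaration (sort_keywords declaration)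

-- ===== LEMMAS AND PROOFS =====

lemma pvRank_bound (w : String) : 0 ≤ pvRank w ∧ pvRank w ≤ 4 := by
  unfold pvRank; split_ifs <;> omega

-- the four keyword lists are pairwise disjoint
lemma pvDisj01 (x : String) (h : pvAccessModifiers.contains x = true) :
    pvOtherModifiers.contains x = false := by
  simp only [pvAccessModifiers, List.contains_eq_mem, decide_eq_true_eq] at h
  simp only [List.mem_cons, List.not_mem_nil, or_false] at h
  rcases h with rfl | rfl | rfl | rfl <;> rfl

lemma pvDisj02 (x : String) (h : pvAccessModifiers.contains x = true) :
    pvTypeKeywords.contains x = false := by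
  simp only [pvAccessModifiers, List.contains_eq_mem, decide_eq_true_eq] at h
  simp only [List.mem_cons, List.not_mem_nil, or_false] at h
  rcases h with rfl | rfl | rfl | rfl <;> rfl

lemma pvDisj03 (x : String) (h : pvAccessModifiers.contains x = true) :
    pvDesignators.contains x = false := by
  simp only [pvAccessModifiers, List.contains_eq_mem, decide_eq_true_eq] at h
  simp only [List.mem_cons, List.not_mem_nil, or_false] at h
  rcases h with rfl | rfl | rfl | rfl <;> rfl

lemma pvDisj12 (x : String) (h : pvOtherModifiers.contains x = true) :
    pvTypeKeywords.contains x = false := by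
  simp only [pvOtherModifiers, List.contains_eq_mem, decide_eq_true_eq] at h
  simp only [List.mem_cons, List.not_mem_nil, or_false] at h
  rcases h with rfl | rfl | rfl | rfl | rfl | rfl | rfl | rfl | rfl | rfl | rfl | rfl | rfl | rfl | rfl <;> rfl

lemma pvDisj13 (x : String) (h : pvOtherModifiers.contains x = true) :
    pvDesignators.contains x = false := by
  simp only [pvOtherModifiers, List.contains_eq_mem, decide_eq_true_eq] at h
  simp only [List.mem_cons, List.not_mem_nil, or_false] at h
  rcases h with rfl | rfl | rfl | rfl | rfl | rfl | rfl | rfl | rfl | rfl | rfl | rfl | rfl | rfl | rfl <;> rfl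

lemma pvDisj23 (x : String) (h : pvTypeKeywords.contains x = true) :
    pvDesignators.contains x = false := by
  simp only [pvTypeKeywords, List.contains_eq_mem, decide_eq_true_eq] at h
  simp only [List.mem_cons, List.not_mem_nil, or_false] at h
  rcases h with rfl | rfl | rfl | rfl | rfl | rfl <;> rfl

-- the rank classes are exactly A's five filter predicates
lemma pvKey0 (x : String) : (pvRank x == 0) = pvAccessModifiers.contains x := by
  unfold pvRank; split_ifs with h0 h1 h2 h3 <;> simp_all

lemma pvKey1 (x : String) : (pvRank x == 1) = pvOtherModifiers.contains x := by
  unfold pvRank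
  split_ifs with h0 h1 h2 h3
  · rw [pvDisj01 x h0]; rfl
  · rw [h1]; rfl
  · simp only [Bool.not_eq_true] at h1; rw [h1]; rfl
  · simp only [Bool.not_eq_true] at h1; rw [h1]; rfl
  · simp only [Bool.not_eq_true] at h1; rw [h1]; rfl

lemma pvKey2 (x : String) : (pvRank x == 2) = pvTypeKeywords.contains x := by
  unfold pvRank
  split_ifs with h0 h1 h2 h3
  · rw [pvDisj02 x h0]; rfl
  · rw [pvDisj12 x h1]; rfl
  · rw [h2]; rfl
  · simp only [Bool.not_eq_true] at h2; rw [h2]; rfl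
  · simp only [Bool.not_eq_true] at h2; rw [h2]; rfl

lemma pvKey3 (x : String) : (pvRank x == 3) = pvDesignators.contains x := by
  unfold pvRank
  split_ifs with h0 h1 h2 h3
  · rw [pvDisj03 x h0]; rfl
  · rw [pvDisj13 x h1]; rfl
  · rw [pvDisj23 x h2]; rfl
  · rw [h3]; rfl
  · simp only [Bool.not_eq_true] at h3; rw [h3]; rfl

lemma pvKey4 (x : String) :
    (pvRank x == 4) =
      !((pvAccessModifiers ++ pvOtherModifiers ++ pvTypeKeywords ++ pvDesignators).contains x) := by
  unfold pvRank
  simp only [List.contains_eq_mem, List.mem_append]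
  split_ifs with h0 h1 h2 h3 <;>
    simp_all

lemma insertBy_cons (b : String → String → Bool) (x y : String) (t : List String) :
    PySem.List.insertBy b x (y :: t) = if b x y then x :: y :: t else y :: PySem.List.insertBy b x t := rfl

lemma insertBy_skip (b : String → String → Bool) (x : String) (ys zs : List String)
    (h : ∀ y ∈ ys, b x y = false) :
    PySem.List.insertBy b x (ys ++ zs) = ys ++ PySem.List.insertBy b x zs := by
  induction ys with
  | nil => simp
  | cons y t ih =>
    rw [List.cons_append, insertBy_cons, h y (List.mem_cons_self), if_neg (by simp)]
    rw [ih (fun y hy => h y (List.mem_cons_of_mem _ hy))]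
    simp

lemma insertBy_all (b : String → String → Bool) (x : String) (zs : List String)
    (h : ∀ y ∈ zs, b x y = true) :
    PySem.List.insertBy b x zs = x :: zs := by
  cases zs with
  | nil => rfl
  | cons y t => rw [insertBy_cons, h y (List.mem_cons_self), if_pos rfl]

lemma insertBy_last (b : String → String → Bool) (x : String) (zs : List String)
    (h : ∀ y ∈ zs, b x y = false) :
    PySem.List.insertBy b x zs = zs ++ [x] := by
  induction zs with
  | nil => rfl
  | cons y t ih =>
    rw [insertBy_cons, h y (List.mem_cons_self), if_neg (by simp)]
    rw [ih (fun y hy => h y (List.mem_cons_of_mem _ hy))]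
    simp

-- a stable sort by a key with values in {0,…,4} is the concatenation of the five rank classes
lemma sorted_five (xs : List String) (key : String → Int) (hb : ∀ x, 0 ≤ key x ∧ key x ≤ 4) :
    PySem.List.sorted xs key false =
      xs.filter (fun x => key x == 0) ++ xs.filter (fun x => key x == 1) ++
      xs.filter (fun x => key x == 2) ++ xs.filter (fun x => key x == 3) ++
      xs.filter (fun x => key x == 4) := by
  have hmem : ∀ (i : Int) (ys : List String) (y : String),
      y ∈ ys.filter (fun x => key x == i) → key y = i := by
    intro i ys y hy
    rw [List.mem_filter] at hy
    simpa using hy.2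
  induction xs using List.reverseRecOn with
  | nil => rfl
  | append_singleton xs a ih =>
    rw [PySem.List.sorted_eq_foldl_insertBy, List.foldl_append, List.foldl_cons, List.foldl_nil,
        ← PySem.List.sorted_eq_foldl_insertBy, ih]
    simp only [List.filter_append, List.filter_cons, List.filter_nil]
    have hb' := hb a
    have hcase : key a = 0 ∨ key a = 1 ∨ key a = 2 ∨ key a = 3 ∨ key a = 4 := by omega
    have hskip : ∀ (i : Int), i ≤ key a →
        ∀ y ∈ xs.filter (fun x => key x == i), (decide (key a < key y)) = false := by
      intro i hi y hy
      have := hmem i xs y hy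
      simp only [decide_eq_false_iff_not, not_lt]
      omega
    have hall : ∀ (i : Int), key a < i →
        ∀ y ∈ xs.filter (fun x => key x == i), (decide (key a < key y)) = true := by
      intro i hi y hy
      have := hmem i xs y hy
      simp only [decide_eq_true_eq]
      omega
    rw [List.append_assoc, List.append_assoc, List.append_assoc]
    rcases hcase with h | h | h | h | h
    · -- key a = 0
      rw [insertBy_skip _ _ _ _ (hskip 0 (by omega)),
          insertBy_all _ _ _ (List.forall_mem_append.mpr
            ⟨hall 1 (by omega), List.forall_mem_append.mpr
              ⟨hall 2 (by omega), List.forall_mem_append.mpr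
                ⟨hall 3 (by omega), hall 4 (by omega)⟩⟩⟩)]
      simp [h]
    · -- key a = 1
      rw [insertBy_skip _ _ _ _ (hskip 0 (by omega)),
          insertBy_skip _ _ _ _ (hskip 1 (by omega)),
          insertBy_all _ _ _ (List.forall_mem_append.mpr
            ⟨hall 2 (by omega), List.forall_mem_append.mpr
              ⟨hall 3 (by omega), hall 4 (by omega)⟩⟩)]
      simp [h]
    · -- key a = 2
      rw [insertBy_skip _ _ _ _ (hskip 0 (by omega)),
          insertBy_skip _ _ _ _ (hskip 1 (by omega)),
          insertBy_skip _ _ _ _ (hskip 2 (by omega)),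
          insertBy_all _ _ _ (List.forall_mem_append.mpr
            ⟨hall 3 (by omega), hall 4 (by omega)⟩)]
      simp [h]
    · -- key a = 3
      rw [insertBy_skip _ _ _ _ (hskip 0 (by omega)),
          insertBy_skip _ _ _ _ (hskip 1 (by omega)),
          insertBy_skip _ _ _ _ (hskip 2 (by omega)),
          insertBy_skip _ _ _ _ (hskip 3 (by omega)),
          insertBy_all _ _ _ (hall 4 (by omega))]
      simp [h]
    · -- key a = 4
      rw [insertBy_skip _ _ _ _ (hskip 0 (by omega)),
          insertBy_skip _ _ _ _ (hskip 1 (by omega)),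
          insertBy_skip _ _ _ _ (hskip 2 (by omega)),
          insertBy_skip _ _ _ _ (hskip 3 (by omega)),
          insertBy_last _ _ _ (hskip 4 (by omega))]
      simp [h]

-- ===== VERDICT (by name: the statement is the Claim_ definition above) =====
theorem sort_keywords_spec : Claim_equal_sort_keywords := by
  intro declaration _
  unfold Spec_sort_keywords sort_keywords sort_keywords_alt
  simp only []
  rw [sorted_five _ pvRank pvRank_bound]
  simp only [pvKey0, pvKey1, pvKey2, pvKey3, pvKey4]
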